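-- pv_equiv track=rewrite | github.com/zhongwei8/backup | data/tools/label_tool.py | get_activity_str
-- ===== SOURCE A (Python) =====
-- label_dict = {
--     "WalkOutSide": 1,
--     "WalkInDoor": 2,
--     "RuningOutSide": 3,
--     "InCar": 4,
--     "Lying": 5,
--     "Biking": 6,
--     "Sitting": 7,
--     "Upstairs": 8,
--     "Downstairs": 9,
--     "Standing": 10,
--     "Driving": 11,
--     "RuningInDoor": 12,
--     "RowingMachine": 13,
--     "EllipticalMachine": 14,
--     "Swimming": 15,
--     "RopeJump": 16,
--     "Nap": 17,
--     "Others": 1000,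
-- }
--
-- def get_activity_str(filename):
--     items = filename.split('-')
--     ret_val = ''
--     for item in items:
--         if item.startswith('scene_'):
--             ret_val = item.replace('scene_', '')
--         elif item in label_dict:
--             ret_val = item
--     return ret_val
-- ===== SOURCE B (Python) =====
-- label_dict = {
--     "WalkOutSide": 1,
--     "WalkInDoor": 2,
--     "RuningOutSide": 3,
--     "InCar": 4,
--     "Lying": 5,
--     "Biking": 6,
--     "Sitting": 7,
--     "Upstairs": 8,
--     "Downstairs": 9,
--     "Standing": 10,
--     "Driving": 11,
--     "RuningInDoor": 12,
--     "RowingMachine": 13,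
--     "EllipticalMachine": 14,
--     "Swimming": 15,
--     "RopeJump": 16,
--     "Nap": 17,
--     "Others": 1000,
-- }
--
--
-- def get_activity_str(filename):
--     # scan the parts back to front and return eagerly on the first match:
--     # the last matching part is exactly what A's overwrite-loop keeps.
--     for item in reversed(filename.split('-')):
--         if item.startswith('scene_'):
--             return item.replace('scene_', '')
--         if item in label_dict:
--             return item
--     return ''
-- ===== Notes on version B (the rewrite author's own statement) =====
-- stated objective: alternative
-- what changed: B scans the split parts in reverse and returns eagerly on the first match (with the same scene_/label priority), instead of A's forward scan that overwrites an accumulator so the last match wins; no accumulator is maintained and the scan stops early.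
import Mathlib
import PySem

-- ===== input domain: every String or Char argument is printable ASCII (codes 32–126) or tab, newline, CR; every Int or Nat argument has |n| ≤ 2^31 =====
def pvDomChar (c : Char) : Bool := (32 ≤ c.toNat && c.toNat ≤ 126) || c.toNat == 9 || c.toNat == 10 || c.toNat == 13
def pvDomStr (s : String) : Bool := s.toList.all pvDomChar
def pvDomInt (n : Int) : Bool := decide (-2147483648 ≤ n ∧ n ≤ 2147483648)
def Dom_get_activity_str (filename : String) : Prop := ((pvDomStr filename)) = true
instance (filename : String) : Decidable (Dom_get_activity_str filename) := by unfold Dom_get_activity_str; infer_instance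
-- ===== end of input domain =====

-- B scans the split parts in reverse with early return instead of A's forward
-- overwrite-accumulator loop; same value everywhere (alternative decomposition).


-- module-level constant: the keys of label_dict ('item in label_dict' is key membership)
def labelKeys : List String :=
  ["WalkOutSide", "WalkInDoor", "RuningOutSide", "InCar", "Lying", "Biking",
   "Sitting", "Upstairs", "Downstairs", "Standing", "Driving", "RuningInDoor",
   "RowingMachine", "EllipticalMachine", "Swimming", "RopeJump", "Nap", "Others"]

-- ===== PORT A =====
def get_activity_str (filename : String) : String :=
  let items := (PySem.Str.split? filename "-").getD []
  items.foldl
    (fun ret_val item =>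
      if PySem.Str.startswith item "scene_" then PySem.Str.replace item "scene_" ""
      else if labelKeys.contains item then item
      else ret_val) ""

-- ===== PORT B =====
-- B's reverse scan with early return
def pvScanB : List String → String
  | [] => ""
  | item :: rest =>
    if PySem.Str.startswith item "scene_" then PySem.Str.replace item "scene_" ""
    else if labelKeys.contains item then item
    else pvScanB rest

def get_activity_str_alt (filename : String) : String :=
  pvScanB ((PySem.Str.split? filename "-").getD []).reverse

-- ===== PRECONDITION & SPEC =====
def Spec_get_activity_str (filename : String) (out : String) : Prop := out = get_activity_str_alt filename
instance (filename : String) (out : String) : Decidable (Spec_get_activity_str filename out) := by unfold Spec_get_activity_str; infer_instance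

-- ===== CLAIM (what is proved, stated in full; the proofs are below) =====
def Claim_equal_get_activity_str : Prop := ∀ (filename : String), Dom_get_activity_str filename → Spec_get_activity_str filename (get_activity_str filename)

-- ===== LEMMAS AND PROOFS =====

-- A's fold step, with an accumulator
def pvStep (acc item : String) : String :=
  if PySem.Str.startswith item "scene_" then PySem.Str.replace item "scene_" ""
  else if labelKeys.contains item then item
  else acc

-- B's scan generalized with an accumulator for the no-match case
def pvScanAux : List String → String → String
  | [], a => a
  | item :: rest, a =>
    if PySem.Str.startswith item "scene_" then PySem.Str.replace item "scene_" ""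
    else if labelKeys.contains item then item
    else pvScanAux rest a

theorem pvScanAux_append (ys : List String) (x a : String) :
    pvScanAux (ys ++ [x]) a = pvScanAux ys (pvStep a x) := by
  induction ys with
  | nil => simp [pvScanAux, pvStep]
  | cons y ys ih => simp [pvScanAux, ih]

theorem foldl_eq_scanAux (l : List String) (acc : String) :
    l.foldl pvStep acc = pvScanAux l.reverse acc := by
  induction l generalizing acc with
  | nil => simp [pvScanAux]
  | cons x xs ih => simp [List.foldl, ih, pvScanAux_append]

theorem scanAux_empty (xs : List String) : pvScanAux xs "" = pvScanB xs := by
  induction xs with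
  | nil => rfl
  | cons x xs ih => simp [pvScanAux, pvScanB, ih]

-- ===== VERDICT (by name: the statement is the Claim_ definition above) =====
theorem get_activity_str_spec : Claim_equal_get_activity_str := by
  intro filename _
  unfold Spec_get_activity_str get_activity_str get_activity_str_alt
  change List.foldl pvStep "" ((PySem.Str.split? filename "-").getD []) = _
  rw [foldl_eq_scanAux, scanAux_empty]
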